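-- pv_equiv track=rewrite | github.com/bitcoreos/ginkgo_antibody_developability_2025 | polyreactivity_analysis/residue_clustering/residue_clustering.py | _identify_clusters
-- ===== SOURCE A (Python) =====
-- def _identify_clusters(sequence, property_group):
--     """
--     Identify clusters of consecutive residues belonging to a property group
--
--     Parameters:
--     sequence (str): Amino acid sequence
--     property_group (set): Set of amino acids belonging to a property group
--
--     Returns:
--     list: List of tuples (start_position, end_position) for each cluster
--     """
--     clusters = []
--     in_cluster = False
--     cluster_start = 0
--
--     for i, aa in enumerate(sequence):
--         if aa in property_group:
--             if not in_cluster: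
--                 # Start of a new cluster
--                 in_cluster = True
--                 cluster_start = i
--         else:
--             if in_cluster:
--                 # End of current cluster
--                 clusters.append((cluster_start, i-1))
--                 in_cluster = False
--
--     # Handle case where sequence ends with a cluster
--     if in_cluster:
--         clusters.append((cluster_start, len(sequence)-1))
--
--     return clusters
-- ===== SOURCE B (Python) =====
-- def _identify_clusters(sequence, property_group):
--     """Two-pointer run scanner: jump from cluster start to cluster end directly."""
--     clusters = []
--     n = len(sequence)
--     i = 0
--     while i < n:
--         if sequence[i] not in property_group:
--             i += 1
--             continue
--         j = i
--         while j + 1 < n and sequence[j + 1] in property_group: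
--             j += 1
--         clusters.append((i, j))
--         i = j + 1
--     return clusters
-- ===== Notes on version B (the rewrite author's own statement) =====
-- stated objective: alternative
-- what changed: Replaces A's in_cluster/cluster_start boolean state machine with a two-pointer run scanner: an outer loop finds a cluster's first index and an inner loop advances directly to its last index, emitting (i, j) per run with no flag state.
import Mathlib
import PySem

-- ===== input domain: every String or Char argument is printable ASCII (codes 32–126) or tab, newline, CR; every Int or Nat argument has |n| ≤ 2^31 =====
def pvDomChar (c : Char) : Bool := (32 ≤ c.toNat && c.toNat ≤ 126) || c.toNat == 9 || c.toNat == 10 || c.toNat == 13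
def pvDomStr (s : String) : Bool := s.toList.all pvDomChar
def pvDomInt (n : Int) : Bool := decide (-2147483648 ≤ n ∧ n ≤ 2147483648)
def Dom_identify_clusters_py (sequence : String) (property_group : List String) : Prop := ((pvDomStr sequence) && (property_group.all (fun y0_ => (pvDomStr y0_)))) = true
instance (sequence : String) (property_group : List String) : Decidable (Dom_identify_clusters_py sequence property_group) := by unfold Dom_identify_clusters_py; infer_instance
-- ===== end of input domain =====

-- B replaces A's in_cluster/cluster_start state machine with a two-pointer run scanner
-- (same cost; equivalence of the return values is proved below).

-- `aa in property_group`: the one-character string aa compared against each group element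
def pvMemG (property_group : List String) (c : Char) : Bool :=
  property_group.contains (String.mk [c])

-- ===== PORT A =====
-- A's for-loop over enumerate(sequence) with state (clusters, in_cluster, cluster_start);
-- i is the enumerate counter.
def pvLoopA (pg : List String) :
    List Char → Int → List (Int × Int) → Bool → Int → List (Int × Int)
  | [], i, clusters, inCluster, clusterStart =>
      -- after the loop: if in_cluster, append (cluster_start, len(sequence)-1) = (cluster_start, i-1)
      if inCluster then clusters ++ [(clusterStart, i - 1)] else clusters
  | c :: cs, i, clusters, inCluster, clusterStart =>
      if pvMemG pg c then
        if inCluster then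
          pvLoopA pg cs (i + 1) clusters true clusterStart
        else
          pvLoopA pg cs (i + 1) clusters true i
      else
        if inCluster then
          pvLoopA pg cs (i + 1) (clusters ++ [(clusterStart, i - 1)]) false clusterStart
        else
          pvLoopA pg cs (i + 1) clusters false clusterStart

def identify_clusters_py (sequence : String) (property_group : List String) : List (Int × Int) :=
  pvLoopA property_group sequence.toList 0 [] false 0

-- ===== PORT B =====
-- B's inner while loop: given the chars after index j (j already in the cluster),
-- advance j while the next char is in the group; return (last index j, remaining chars).
def pvRunB (pg : List String) : List Char → Int → Int × List Char
  | [], j => (j, [])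
  | c :: cs, j => if pvMemG pg c then pvRunB pg cs (j + 1) else (j, c :: cs)

theorem pvRunB_len (pg : List String) :
    ∀ (cs : List Char) (j : Int), (pvRunB pg cs j).2.length ≤ cs.length := by
  intro cs
  induction cs with
  | nil => intro j; simp [pvRunB]
  | cons c cs ih =>
      intro j
      by_cases h : pvMemG pg c
      · simp only [pvRunB, h, if_true]
        exact le_trans (ih (j + 1)) (Nat.le_succ _)
      · simp [pvRunB, h]

-- B's outer while loop: skip non-members; at a member i, jump to the run's end j,
-- emit (i, j) and resume after j.
def pvAltLoop (pg : List String) : List Char → Int → List (Int × Int)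
  | [], _ => []
  | c :: cs, i =>
      if pvMemG pg c then
        (i, (pvRunB pg cs i).1) :: pvAltLoop pg (pvRunB pg cs i).2 ((pvRunB pg cs i).1 + 1)
      else
        pvAltLoop pg cs (i + 1)
  termination_by cs _ => cs.length
  decreasing_by
  · exact Nat.lt_succ_of_le (pvRunB_len pg cs i)
  · exact Nat.lt_succ_self _

def identify_clusters_py_alt (sequence : String) (property_group : List String) : List (Int × Int) :=
  pvAltLoop property_group sequence.toList 0

-- ===== PRECONDITION & SPEC =====
def Spec_identify_clusters_py (sequence : String) (property_group : List String) (out : List (Int × Int)) : Prop := out = identify_clusters_py_alt sequence property_group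
instance (sequence : String) (property_group : List String) (out : List (Int × Int)) : Decidable (Spec_identify_clusters_py sequence property_group out) := by unfold Spec_identify_clusters_py; infer_instance

-- ===== CLAIM (what is proved, stated in full; the proofs are below) =====
def Claim_equal_identify_clusters_py : Prop := ∀ (sequence : String) (property_group : List String), Dom_identify_clusters_py sequence property_group → Spec_identify_clusters_py sequence property_group (identify_clusters_py sequence property_group)

-- ===== LEMMAS AND PROOFS =====

theorem pvAltLoop_nil (pg : List String) (i : Int) : pvAltLoop pg [] i = [] := by
  rw [pvAltLoop]

theorem pvAltLoop_cons (pg : List String) (c : Char) (cs : List Char) (i : Int) :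
    pvAltLoop pg (c :: cs) i =
      if pvMemG pg c then
        (i, (pvRunB pg cs i).1) :: pvAltLoop pg (pvRunB pg cs i).2 ((pvRunB pg cs i).1 + 1)
      else
        pvAltLoop pg cs (i + 1) := by
  rw [pvAltLoop]

-- The key invariant, proved by one structural induction:
-- (1) out of a cluster, A's loop appends exactly B's output from here on;
-- (2) inside a cluster started at s whose last seen index is j (counter i = j+1),
--     A's loop appends (s, end of run) followed by B's output after the run.
theorem pvKey (pg : List String) (cs : List Char) :
    (∀ (i : Int) (acc : List (Int × Int)) (s : Int),
        pvLoopA pg cs i acc false s = acc ++ pvAltLoop pg cs i) ∧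
    (∀ (j : Int) (acc : List (Int × Int)) (s : Int),
        pvLoopA pg cs (j + 1) acc true s =
          acc ++ (s, (pvRunB pg cs j).1) ::
            pvAltLoop pg (pvRunB pg cs j).2 ((pvRunB pg cs j).1 + 1)) := by
  induction cs with
  | nil =>
      constructor
      · intro i acc s; simp [pvLoopA, pvAltLoop_nil]
      · intro j acc s
        simp only [pvLoopA, pvRunB, pvAltLoop_nil, if_true]
        norm_num
  | cons c cs ih =>
      obtain ⟨ih1, ih2⟩ := ih
      by_cases h : pvMemG pg c
      · constructor
        · intro i acc s
          simp only [pvLoopA, pvAltLoop_cons, h, if_true, Bool.false_eq_true, if_false]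
          exact ih2 i acc i
        · intro j acc s
          simp only [pvLoopA, pvRunB, pvAltLoop_cons, h, if_true]
          have : j + 1 + 1 = (j + 1) + 1 := rfl
          rw [this]
          exact ih2 (j + 1) acc s
      · constructor
        · intro i acc s
          simp only [pvLoopA, pvAltLoop_cons, h, if_false, Bool.false_eq_true]
          exact ih1 (i + 1) acc s
        · intro j acc s
          simp only [pvLoopA, pvRunB, h, if_true, Bool.false_eq_true, if_false]
          have hj : j + 1 - 1 = j := by ring
          rw [hj, ih1 (j + 1 + 1) (acc ++ [(s, j)]) s, pvAltLoop_cons]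
          simp [h]

-- ===== VERDICT (by name: the statement is the Claim_ definition above) =====
theorem identify_clusters_py_spec : Claim_equal_identify_clusters_py := by
  intro sequence property_group _
  unfold Spec_identify_clusters_py identify_clusters_py identify_clusters_py_alt
  simpa using (pvKey property_group sequence.toList).1 0 [] 0
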